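-- pv_equiv track=rewrite | github.com/ribo0715/algorithm_solution | 프로그래머스/숫자 짝꿍.py | solution
-- ===== SOURCE A (Python) =====
-- def solution(X, Y):
--     answer = ''
--
--     for i in reversed(range(10)):
--         answer += (str(i) * min(X.count(str(i)), Y.count(str(i))))
--
--     if answer == '':
--         return '-1'
--     elif len(answer) == answer.count('0'):  # elif int(answer) == 0: 으로 하는 경우 시간초과가 나옴
--         return '0'
--     else:
--         return answer
-- ===== SOURCE B (Python) =====
-- def solution(X, Y):
--     xs = sorted((c for c in X if c.isdigit()), reverse=True)
--     ys = sorted((c for c in Y if c.isdigit()), reverse=True)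
--     out = []
--     i = j = 0
--     while i < len(xs) and j < len(ys):
--         if xs[i] == ys[j]:
--             out.append(xs[i])
--             i += 1
--             j += 1
--         elif xs[i] > ys[j]:
--             i += 1
--         else:
--             j += 1
--     if not out:
--         return '-1'
--     if out[0] == '0':
--         return '0'
--     return ''.join(out)
-- ===== Notes on version B (the rewrite author's own statement) =====
-- stated objective: alternative
-- what changed: A counts each of the ten digits in both strings with .count and concatenates in a fixed reversed range(10) loop; B sorts the digit characters of each string in descending order and computes the multiset intersection with a two-pointer merge, then checks the first character for the all-zero case.
import Mathlib
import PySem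

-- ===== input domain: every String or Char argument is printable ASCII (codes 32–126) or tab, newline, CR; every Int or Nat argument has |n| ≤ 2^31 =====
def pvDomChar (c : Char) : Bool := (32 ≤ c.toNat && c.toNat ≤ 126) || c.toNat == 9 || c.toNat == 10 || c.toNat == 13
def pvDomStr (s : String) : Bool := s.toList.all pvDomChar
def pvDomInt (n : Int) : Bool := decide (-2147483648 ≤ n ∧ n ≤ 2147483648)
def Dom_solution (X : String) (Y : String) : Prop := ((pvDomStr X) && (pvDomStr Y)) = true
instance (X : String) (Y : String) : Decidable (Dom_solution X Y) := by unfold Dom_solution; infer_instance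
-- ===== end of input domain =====

-- B replaces A's ten per-digit .count scans with sorting the digit characters of each
-- string descending and a two-pointer merge intersection (objective: alternative).

-- s * n for a Python string (exact: Python returns '' for n ≤ 0, List.replicate 0 likewise)
def pvStrMul (s : List Char) (n : Nat) : List Char := (List.replicate n s).flatten

-- ===== PORT A =====
-- for i in reversed(range(10)): answer += str(i) * min(X.count(str(i)), Y.count(str(i)))
def pvAAnswer (X Y : String) : List Char :=
  ((PySem.List.pyRange 0 10 1).reverse).foldl
    (fun acc i =>
      acc ++ pvStrMul (PySem.Int.toStr i).toList
        (min (PySem.Str.count X (PySem.Int.toStr i)) (PySem.Str.count Y (PySem.Int.toStr i)))) []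

def solution (X : String) (Y : String) : String :=
  let answer := pvAAnswer X Y
  if answer = [] then "-1"
  else if PySem.Chars.len answer = (PySem.Chars.count answer ['0'] : Int) then "0"
  else String.ofList answer

-- ===== PORT B =====
-- the while loop: two pointers advance through the sorted lists, so it is recursion on
-- the two suffixes xs[i:], ys[j:]; out accrues the common characters
def pvMerge : List Char → List Char → List Char
  | x :: xs, y :: ys =>
      if x = y then x :: pvMerge xs ys
      else if y < x then pvMerge xs (y :: ys)
      else pvMerge (x :: xs) ys
  | _, _ => []
  termination_by a b => a.length + b.length
  decreasing_by all_goals simp <;> omega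

-- xs = sorted((c for c in X if c.isdigit()), reverse=True), same for ys
def solution_alt (X : String) (Y : String) : String :=
  let xs := PySem.List.sorted (X.toList.filter (fun c => PySem.Chars.isdigit c)) (fun c => c) true
  let ys := PySem.List.sorted (Y.toList.filter (fun c => PySem.Chars.isdigit c)) (fun c => c) true
  let out := pvMerge xs ys
  match out with
  | [] => "-1"
  | c :: _ => if c = '0' then "0" else String.ofList out

-- ===== PRECONDITION & SPEC =====
def Spec_solution (X : String) (Y : String) (out : String) : Prop := out = solution_alt X Y
instance (X : String) (Y : String) (out : String) : Decidable (Spec_solution X Y out) := by unfold Spec_solution; infer_instance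

-- ===== CLAIM (what is proved, stated in full; the proofs are below) =====
def Claim_equal_solution : Prop := ∀ (X : String) (Y : String), Dom_solution X Y → Spec_solution X Y (solution X Y)

-- ===== LEMMAS AND PROOFS =====

def pvDigits : List Char := ['9','8','7','6','5','4','3','2','1','0']

-- the shared-digit string both programs compute, written per digit
def pvCanon (xs ys : List Char) : List Char :=
  pvDigits.flatMap (fun c => List.replicate (min (xs.count c) (ys.count c)) c)

-- the descending-sorted form of a list of digit characters
def pvRep (ds l : List Char) : List Char :=
  ds.flatMap (fun c => List.replicate (l.count c) c)

lemma pvStrMul_single (c : Char) (n : Nat) : pvStrMul [c] n = List.replicate n c := by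
  induction n with
  | zero => rfl
  | succ k ih => simp_all [pvStrMul, List.replicate_succ]

lemma pvCount_go_single (c : Char) : ∀ (fuel : Nat) (l : List Char) (acc : Nat), l.length ≤ fuel →
    PySem.Chars.count.go [c] fuel l acc = acc + l.count c := by
  intro fuel
  induction fuel with
  | zero =>
      intro l acc h
      cases l with
      | nil => simp [PySem.Chars.count.go]
      | cons a t => simp at h
  | succ n ih =>
      intro l acc h
      cases l with
      | nil => simp [PySem.Chars.count.go]
      | cons a t =>
          have ht : t.length ≤ n := by simpa using h
          by_cases hc : c = a
          · subst hc
            have hpre : [c].isPrefixOf (c :: t) = true := by simp [List.isPrefixOf]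
            simp only [PySem.Chars.count.go, hpre, if_true]
            simp [ih t (acc + 1) ht]
            omega
          · have hpre : [c].isPrefixOf (a :: t) = false := by
              simp [List.isPrefixOf]; exact fun hh => hc hh
            simp only [PySem.Chars.count.go, hpre]
            simp [ih t acc ht, List.count_cons]
            exact fun hh => hc hh.symm

lemma pvCount_single (l : List Char) (c : Char) : PySem.Chars.count l [c] = l.count c := by
  simp [PySem.Chars.count, pvCount_go_single c l.length l 0 le_rfl]

lemma pvMem_digits (c : Char) : c ∈ pvDigits ↔ PySem.Chars.isdigit c = true := by
  constructor
  · intro h; fin_cases h <;> decide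
  · intro h
    simp [PySem.Chars.isdigit] at h
    have h1 : 48 ≤ c.toNat := h.1
    have h2 : c.toNat ≤ 57 := h.2
    have hc : Char.ofNat c.toNat = c := Char.ofNat_toNat c
    interval_cases h3 : c.toNat <;> rw [← hc] <;> decide

lemma pvAAnswer_eq (X Y : String) : pvAAnswer X Y = pvCanon X.toList Y.toList := by
  unfold pvAAnswer
  rw [show (PySem.List.pyRange 0 10 1).reverse = ([9,8,7,6,5,4,3,2,1,0] : List Int) from by decide]
  simp only [List.foldl_cons, List.foldl_nil, PySem.Str.count_eq, PySem.Int.toStr]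
  simp only [show PySem.Int.toChars 9 = ['9'] from rfl, show PySem.Int.toChars 8 = ['8'] from rfl,
    show PySem.Int.toChars 7 = ['7'] from rfl, show PySem.Int.toChars 6 = ['6'] from rfl,
    show PySem.Int.toChars 5 = ['5'] from rfl, show PySem.Int.toChars 4 = ['4'] from rfl,
    show PySem.Int.toChars 3 = ['3'] from rfl, show PySem.Int.toChars 2 = ['2'] from rfl,
    show PySem.Int.toChars 1 = ['1'] from rfl, show PySem.Int.toChars 0 = ['0'] from rfl]
  simp [pvCanon, pvDigits, pvStrMul_single, pvCount_single]

lemma pvMerge_nil_right (X : List Char) : pvMerge X [] = [] := by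
  cases X <;> simp [pvMerge]

lemma pvMerge_cons_cons (x y : Char) (xs ys : List Char) :
    pvMerge (x :: xs) (y :: ys)
      = if x = y then x :: pvMerge xs ys
        else if y < x then pvMerge xs (y :: ys)
        else pvMerge (x :: xs) ys := by
  simp [pvMerge]

lemma pvMerge_skip_left (c : Char) (Y : List Char) (hY : ∀ y ∈ Y, y < c) :
    ∀ (k : Nat) (X : List Char), pvMerge (List.replicate k c ++ X) Y = pvMerge X Y := by
  intro k
  induction k with
  | zero => intro X; simp
  | succ n ih =>
      intro X
      cases Y with
      | nil => rw [pvMerge_nil_right, pvMerge_nil_right]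
      | cons y Y' =>
          have hy : y < c := hY y (List.mem_cons_self)
          rw [List.replicate_succ, List.cons_append]
          rw [pvMerge_cons_cons,
            if_neg (by intro h; exact absurd h.symm (ne_of_lt hy)), if_pos hy]
          exact ih X

lemma pvMerge_skip_right (c : Char) (X : List Char) (hX : ∀ x ∈ X, x < c) :
    ∀ (k : Nat) (Y : List Char), pvMerge X (List.replicate k c ++ Y) = pvMerge X Y := by
  intro k
  induction k with
  | zero => intro Y; simp
  | succ n ih =>
      intro Y
      cases X with
      | nil => simp [pvMerge]
      | cons x X' =>
          have hx : x < c := hX x (List.mem_cons_self)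
          rw [List.replicate_succ, List.cons_append, pvMerge_cons_cons,
            if_neg (ne_of_lt hx), if_neg (by exact not_lt_of_gt hx)]
          exact ih Y

lemma pvMerge_rep (c : Char) : ∀ (a b : Nat) (X Y : List Char),
    pvMerge (List.replicate a c ++ X) (List.replicate b c ++ Y)
      = List.replicate (min a b) c
        ++ pvMerge (List.replicate (a - b) c ++ X) (List.replicate (b - a) c ++ Y) := by
  intro a
  induction a with
  | zero => intro b X Y; simp
  | succ n ih =>
      intro b X Y
      cases b with
      | zero => simp
      | succ m =>
          rw [List.replicate_succ, List.replicate_succ, List.cons_append, List.cons_append]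
          rw [pvMerge_cons_cons, if_pos rfl, ih m X Y]
          simp [Nat.succ_min_succ, List.replicate_succ, Nat.succ_sub_succ]

lemma pvMem_pvRep {ds l : List Char} {x : Char} (h : x ∈ pvRep ds l) : x ∈ ds := by
  unfold pvRep at h
  rcases List.mem_flatMap.mp h with ⟨c, hc, hx⟩
  rw [(List.eq_of_mem_replicate hx)]
  exact hc

lemma pvMerge_pvRep : ∀ (ds : List Char), ds.Pairwise (· > ·) → ∀ (xs ys : List Char),
    pvMerge (pvRep ds xs) (pvRep ds ys)
      = ds.flatMap (fun c => List.replicate (min (xs.count c) (ys.count c)) c) := by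
  intro ds
  induction ds with
  | nil => intro _ xs ys; simp [pvRep, pvMerge]
  | cons d ds' ih =>
      intro hp xs ys
      rcases List.pairwise_cons.mp hp with ⟨hd, hp'⟩
      have hXr : ∀ x ∈ pvRep ds' xs, x < d := fun x hx => hd x (pvMem_pvRep hx)
      have hYr : ∀ y ∈ pvRep ds' ys, y < d := fun y hy => hd y (pvMem_pvRep hy)
      show pvMerge (List.replicate (xs.count d) d ++ pvRep ds' xs)
          (List.replicate (ys.count d) d ++ pvRep ds' ys) = _
      rw [pvMerge_rep]
      rcases Nat.le_total (xs.count d) (ys.count d) with h | h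
      · rw [Nat.sub_eq_zero_of_le h, List.replicate_zero, List.nil_append,
          pvMerge_skip_right d (pvRep ds' xs) hXr, ih hp' xs ys]
        rfl
      · rw [Nat.sub_eq_zero_of_le h, List.replicate_zero, List.nil_append,
          pvMerge_skip_left d (pvRep ds' ys) hYr, ih hp' xs ys]
        rfl

lemma pvCount_pvRep (a : Char) : ∀ (ds : List Char), ds.Nodup → ∀ (l : List Char),
    (pvRep ds l).count a = if a ∈ ds then l.count a else 0 := by
  intro ds
  induction ds with
  | nil => intro _ l; simp [pvRep]
  | cons d ds' ih =>
      intro hnd l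
      rcases List.nodup_cons.mp hnd with ⟨hdm, hnd'⟩
      show (List.replicate (l.count d) d ++ pvRep ds' l).count a = _
      rw [List.count_append, List.count_replicate, ih hnd' l]
      by_cases h : a = d
      · subst h
        simp [hdm]
      · simp [h, Ne.symm h, List.mem_cons]

lemma pvPerm_pvRep (ds l : List Char) (hnd : ds.Nodup) (hsub : ∀ x ∈ l, x ∈ ds) :
    (pvRep ds l).Perm l := by
  rw [List.perm_iff_count]
  intro a
  rw [pvCount_pvRep a ds hnd l]
  by_cases h : a ∈ ds
  · simp [h]
  · simp [h, List.count_eq_zero.mpr (fun hm => h (hsub a hm))]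

lemma pvPairwise_flatMap (n : Char → Nat) : ∀ (ds : List Char), ds.Pairwise (· > ·) →
    (ds.flatMap (fun c => List.replicate (n c) c)).Pairwise (fun a b => b ≤ a) := by
  intro ds
  induction ds with
  | nil => intro _; simp
  | cons d ds' ih =>
      intro hp
      rcases List.pairwise_cons.mp hp with ⟨hd, hp'⟩
      rw [List.flatMap_cons, List.pairwise_append]
      refine ⟨List.pairwise_replicate.mpr (Or.inr le_rfl), ih hp', ?_⟩
      intro x hx y hy
      rw [List.eq_of_mem_replicate hx]
      rcases List.mem_flatMap.mp hy with ⟨c, hc, hyc⟩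
      rw [List.eq_of_mem_replicate hyc]
      exact le_of_lt (hd c hc)

lemma pvMem_flatMap_digits {n : Char → Nat} {x : Char}
    (h : x ∈ pvDigits.flatMap (fun c => List.replicate (n c) c)) : x ∈ pvDigits := by
  rcases List.mem_flatMap.mp h with ⟨c, hc, hx⟩
  rw [List.eq_of_mem_replicate hx]
  exact hc

lemma pvSorted_eq_pvRep (l : List Char) (hsub : ∀ x ∈ l, x ∈ pvDigits) :
    PySem.List.sorted l (fun c => c) true = pvRep pvDigits l := by
  have hperm : (PySem.List.sorted l (fun c => c) true).Perm (pvRep pvDigits l) :=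
    (PySem.List.sorted_perm l (fun c => c) true).trans
      (pvPerm_pvRep pvDigits l (by decide) hsub).symm
  exact List.Perm.eq_of_pairwise
    (fun a b _ _ h1 h2 => le_antisymm h2 h1)
    (PySem.List.sorted_pairwise_rev l (fun c => c))
    (pvPairwise_flatMap (fun c => l.count c) pvDigits (by decide))
    hperm

lemma pvFlatMap_congr_mem {α β : Type} (f g : α → List β) :
    ∀ (l : List α), (∀ x ∈ l, f x = g x) → l.flatMap f = l.flatMap g := by
  intro l
  induction l with
  | nil => intro _; rfl
  | cons a t ih =>
      intro h
      rw [List.flatMap_cons, List.flatMap_cons, h a (List.mem_cons_self),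
        ih (fun x hx => h x (List.mem_cons_of_mem a hx))]

lemma pvBAnswer_eq (X Y : String) :
    pvMerge (PySem.List.sorted (X.toList.filter (fun c => PySem.Chars.isdigit c)) (fun c => c) true)
      (PySem.List.sorted (Y.toList.filter (fun c => PySem.Chars.isdigit c)) (fun c => c) true)
      = pvCanon X.toList Y.toList := by
  have hsubX : ∀ x ∈ X.toList.filter (fun c => PySem.Chars.isdigit c), x ∈ pvDigits := by
    intro x hx
    exact (pvMem_digits x).mpr (List.of_mem_filter hx)
  have hsubY : ∀ x ∈ Y.toList.filter (fun c => PySem.Chars.isdigit c), x ∈ pvDigits := by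
    intro x hx
    exact (pvMem_digits x).mpr (List.of_mem_filter hx)
  rw [pvSorted_eq_pvRep _ hsubX, pvSorted_eq_pvRep _ hsubY,
    pvMerge_pvRep pvDigits (by decide)]
  apply pvFlatMap_congr_mem
  intro c hc
  have hdig : PySem.Chars.isdigit c = true := (pvMem_digits c).mp hc
  rw [List.count_filter hdig, List.count_filter hdig]

-- on the shared-digit string (descending, digit characters): all-zeros ↔ the head is '0'
lemma pvZeros_iff (X Y : String) (c : Char) (t : List Char)
    (hl : pvCanon X.toList Y.toList = c :: t) :
    ((pvCanon X.toList Y.toList).count '0' = (pvCanon X.toList Y.toList).length) ↔ c = '0' := by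
  have hpw : (pvCanon X.toList Y.toList).Pairwise (fun a b => b ≤ a) :=
    pvPairwise_flatMap _ pvDigits (by decide)
  have hsub : ∀ x ∈ pvCanon X.toList Y.toList, x ∈ pvDigits := fun x hx =>
    pvMem_flatMap_digits hx
  constructor
  · intro h
    have := List.count_eq_length.mp h c (by rw [hl]; exact List.mem_cons_self)
    exact this.symm
  · intro h
    subst h
    apply List.count_eq_length.mpr
    intro x hx
    have hle : x ≤ '0' := by
      rw [hl] at hpw hx
      rcases List.mem_cons.mp hx with h | h
      · exact le_of_eq h
      · exact (List.pairwise_cons.mp hpw).1 x h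
    have hge : '0' ≤ x := by
      have := hsub x hx
      fin_cases this <;> decide
    exact (le_antisymm hle hge).symm

-- ===== VERDICT (by name: the statement is the Claim_ definition above) =====
theorem solution_spec : Claim_equal_solution := by
  intro X Y _
  unfold Spec_solution solution solution_alt
  simp only [pvAAnswer_eq, pvBAnswer_eq]
  cases hl : pvCanon X.toList Y.toList with
  | nil => simp
  | cons c t =>
      have hz := pvZeros_iff X Y c t hl
      rw [hl] at hz
      rw [if_neg (List.cons_ne_nil c t), pvCount_single, PySem.Chars.len_eq]
      have hcond : (((c :: t).length : Int) = ((c :: t).count '0' : Int)) ↔ c = '0' := by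
        constructor
        · intro h
          exact hz.mp (by exact_mod_cast h.symm)
        · intro h
          exact_mod_cast (hz.mpr h).symm
      rw [show (match c :: t with
          | [] => "-1"
          | c' :: _ => if c' = '0' then "0" else String.ofList (c :: t))
          = if c = '0' then "0" else String.ofList (c :: t) from rfl]
      by_cases hc : c = '0'
      · rw [if_pos (hcond.mpr hc), if_pos hc]
      · rw [if_neg (fun h => hc (hcond.mp h)), if_neg hc]
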